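-- pv_equiv track=rewrite | github.com/bqrosen/CountyTracker | detect_and_fix_gaps.py | find_adjacent_counties
-- ===== SOURCE A (Python) =====
-- from typing import Set, Dict, Tuple, List
--
-- def find_adjacent_counties(features: List[Dict]) -> Dict[int, Set[int]]:
--     """
--     Find counties that share a state and bounding box (likely adjacent).
--     Returns dict mapping feature index to set of potentially adjacent feature indices.
--     """
--     states = {}
--     adjacency = {}
--
--     # Group features by state
--     for idx, feat in enumerate(features):
--         state = feat.get('properties', {}).get('STUSAB', '')
--         if state not in states:
--             states[state] = []
--         states[state].append(idx)
--         adjacency[idx] = set()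
--
--     # Mark as adjacent if in same state (simplified check)
--     for state_indices in states.values():
--         for i in range(len(state_indices)):
--             for j in range(i + 1, len(state_indices)):
--                 idx1, idx2 = state_indices[i], state_indices[j]
--                 adjacency[idx1].add(idx2)
--                 adjacency[idx2].add(idx1)
--
--     return adjacency
-- ===== SOURCE B (Python) =====
-- def find_adjacent_counties(features):
--     """
--     Find counties that share a state (simplified adjacency check).
--     Same result as A, but adjacency is built per state group as
--     group-set minus self, instead of a pairwise double loop.
--     """
--     groups = {}
--     keys = []
--     for idx, feat in enumerate(features):
--         state = feat.get('properties', {}).get('STUSAB', '')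
--         groups.setdefault(state, []).append(idx)
--         keys.append(state)
--     return {idx: set(groups[k]) - {idx} for idx, k in enumerate(keys)}
-- ===== Notes on version B (the rewrite author's own statement) =====
-- stated objective: simpler
-- what changed: The nested i<j pairwise edge-insertion loop over each state group is replaced by a single dict comprehension that assigns each index its state group's set minus itself.
import Mathlib
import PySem

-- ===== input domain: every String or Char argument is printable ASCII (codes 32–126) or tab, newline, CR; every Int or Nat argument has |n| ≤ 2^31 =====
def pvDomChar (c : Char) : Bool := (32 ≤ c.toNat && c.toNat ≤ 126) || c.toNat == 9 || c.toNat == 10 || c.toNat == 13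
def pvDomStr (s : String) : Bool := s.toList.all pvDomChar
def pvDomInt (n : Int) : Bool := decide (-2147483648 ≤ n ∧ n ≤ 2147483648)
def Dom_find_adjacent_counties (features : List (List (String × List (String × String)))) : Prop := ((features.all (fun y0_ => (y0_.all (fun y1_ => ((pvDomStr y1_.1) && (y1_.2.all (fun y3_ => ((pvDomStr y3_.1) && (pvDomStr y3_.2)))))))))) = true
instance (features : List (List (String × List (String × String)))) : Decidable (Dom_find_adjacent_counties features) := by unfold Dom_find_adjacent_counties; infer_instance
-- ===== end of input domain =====

-- B replaces A's nested i<j pairwise edge-insertion over each state group by one dict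
-- comprehension assigning each index its state group's set minus itself (objective: simpler).

-- ===== PORT A =====
-- feat.get('properties', {}).get('STUSAB', '') (shared sub-expression of both Pythons)
def fac_key (feat : List (String × List (String × String))) : String :=
  PySem.Dict.getD (PySem.Dict.mk ((PySem.Dict.mk feat).getD "properties" [])) "STUSAB" ""

def find_adjacent_counties (features : List (List (String × List (String × String)))) : List (Int × List Int) :=
  -- first loop: group indices by state, give every idx an empty adjacency set
  let sa := (PySem.List.enumerate features).foldl
      (fun (s : PySem.Dict String (List Int) × PySem.Dict Int (PySem.Set Int)) p =>
        (let state := fac_key p.2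
         let states := if s.1.contains state then s.1 else s.1.insert state []
         states.insert state (states.getD state [] ++ [p.1]),
         s.2.insert p.1 PySem.Set.empty))
      (PySem.Dict.empty, PySem.Dict.empty)
  -- second loop: for each state group, all i<j pairs, add each index to the other's set
  let adj := sa.1.values.foldl
      (fun adj lst =>
        (PySem.List.pyRange 0 (PySem.List.len lst)).foldl
          (fun adj i =>
            (PySem.List.pyRange (i+1) (PySem.List.len lst)).foldl
              (fun adj j =>
                let idx1 := PySem.List.pyGetD lst i 0
                let idx2 := PySem.List.pyGetD lst j 0
                let adj' := adj.modify idx1 PySem.Set.empty (fun t => PySem.Set.add t idx2)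
                adj'.modify idx2 PySem.Set.empty (fun t => PySem.Set.add t idx1))
              adj)
          adj)
      sa.2
  adj.items

-- ===== PORT B =====
def find_adjacent_counties_alt (features : List (List (String × List (String × String)))) : List (Int × List Int) :=
  -- one loop: groups.setdefault(state, []).append(idx); keys.append(state)
  let gk := (PySem.List.enumerate features).foldl
      (fun (s : PySem.Dict String (List Int) × List String) p =>
        (s.1.modify (fac_key p.2) [] (fun l => l ++ [p.1]),
         s.2 ++ [fac_key p.2]))
      (PySem.Dict.empty, [])
  -- {idx: set(groups[k]) - {idx} for idx, k in enumerate(keys)}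
  (PySem.List.enumerate gk.2).map
    (fun p => (p.1, PySem.Set.diff (PySem.Set.ofList (gk.1.getD p.2 [])) [p.1]))

-- ===== PRECONDITION & SPEC =====
def Spec_find_adjacent_counties (features : List (List (String × List (String × String)))) (out : List (Int × List Int)) : Prop := out = find_adjacent_counties_alt features
instance (features : List (List (String × List (String × String)))) (out : List (Int × List Int)) : Decidable (Spec_find_adjacent_counties features out) := by unfold Spec_find_adjacent_counties; infer_instance

-- ===== CLAIM (what is proved, stated in full; the proofs are below) =====
def Claim_equal_find_adjacent_counties : Prop := ∀ (features : List (List (String × List (String × String)))), Dom_find_adjacent_counties features → Spec_find_adjacent_counties features (find_adjacent_counties features)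

-- ===== LEMMAS AND PROOFS =====

-- the list of state keys, and the group (list of indices) of one state key
def ksOf (features : List (List (String × List (String × String)))) : List String :=
  features.map fac_key

def grp (features : List (List (String × List (String × String)))) (c : String) : List Int :=
  ((PySem.List.enumerate features).filter (fun p => fac_key p.2 == c)).map (fun p => p.1)

-- one symmetric pair insertion of A's inner loop
def pstep (adj : PySem.Dict Int (PySem.Set Int)) (x y : Int) : PySem.Dict Int (PySem.Set Int) :=
  (adj.modify x PySem.Set.empty (fun t => PySem.Set.add t y)).modify y PySem.Set.empty
    (fun t => PySem.Set.add t x)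

def procOne (x : Int) (ys : List Int) (adj : PySem.Dict Int (PySem.Set Int)) :
    PySem.Dict Int (PySem.Set Int) :=
  ys.foldl (fun a y => pstep a x y) adj

def procAll : List Int → PySem.Dict Int (PySem.Set Int) → PySem.Dict Int (PySem.Set Int)
  | [], adj => adj
  | x :: r, adj => procAll r (procOne x r adj)

-- the common normal form both ports are reduced to
def normOut (features : List (List (String × List (String × String)))) : List (Int × List Int) :=
  (PySem.List.pyRange 0 (PySem.List.len features)).map
    (fun i => (i, (grp features (PySem.List.pyGetD (ksOf features) i "")).filter
                    (fun y => decide (y ≠ i))))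


theorem keys_pstep (adj : PySem.Dict Int (PySem.Set Int)) (x y : Int)
    (hx : x ∈ adj.keys) (hy : y ∈ adj.keys) : (pstep adj x y).keys = adj.keys := by
  have hx' := (PySem.Dict.contains_iff_mem_keys adj x).mpr hx
  have hy' := (PySem.Dict.contains_iff_mem_keys adj y).mpr hy
  unfold pstep
  rw [PySem.Dict.keys_modify, PySem.Dict.keys_insert_of_contains,
      PySem.Dict.keys_modify, PySem.Dict.keys_insert_of_contains _ _ hx']
  rw [PySem.Dict.contains_modify]
  simp [hy']

theorem getD_pstep_fst (adj : PySem.Dict Int (PySem.Set Int)) (x y k : Int)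
    (hky : k ≠ y) (hkx : k = x) :
    (pstep adj x y).getD k [] = PySem.Set.add (adj.getD x []) y := by
  subst hkx
  simp only [pstep, PySem.Set.empty]
  rw [PySem.Dict.getD_modify, if_neg hky, PySem.Dict.getD_modify, if_pos rfl]

theorem getD_pstep_snd (adj : PySem.Dict Int (PySem.Set Int)) (x y k : Int)
    (hky : k = y) (hkx : k ≠ x) :
    (pstep adj x y).getD k [] = PySem.Set.add (adj.getD y []) x := by
  subst hky
  simp only [pstep, PySem.Set.empty]
  rw [PySem.Dict.getD_modify, if_pos rfl, PySem.Dict.getD_modify, if_neg hkx]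

theorem getD_pstep_other (adj : PySem.Dict Int (PySem.Set Int)) (x y k : Int)
    (hky : k ≠ y) (hkx : k ≠ x) :
    (pstep adj x y).getD k [] = adj.getD k [] := by
  simp only [pstep, PySem.Set.empty]
  rw [PySem.Dict.getD_modify, if_neg hky, PySem.Dict.getD_modify, if_neg hkx]

theorem keys_procOne (x : Int) (ys : List Int) (adj : PySem.Dict Int (PySem.Set Int))
    (hx : x ∈ adj.keys) (hys : ∀ y ∈ ys, y ∈ adj.keys) :
    (procOne x ys adj).keys = adj.keys := by
  induction ys generalizing adj with
  | nil => rfl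
  | cons y ys' ih =>
      have hk : (pstep adj x y).keys = adj.keys :=
        keys_pstep adj x y hx (hys y (by simp))
      have := ih (pstep adj x y) (by rw [hk]; exact hx)
        (fun z hz => by rw [hk]; exact hys z (by simp [hz]))
      simpa [procOne, List.foldl_cons] using this.trans hk

theorem procOne_getD (x : Int) (ys : List Int) (adj : PySem.Dict Int (PySem.Set Int))
    (hx : x ∉ ys) (hnd : ys.Nodup)
    (hdisj : ∀ y ∈ ys, y ∉ adj.getD x []) (hxy : ∀ y ∈ ys, x ∉ adj.getD y []) :
    ((procOne x ys adj).getD x [] = adj.getD x [] ++ ys)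
    ∧ (∀ y ∈ ys, (procOne x ys adj).getD y [] = adj.getD y [] ++ [x])
    ∧ (∀ k, k ≠ x → k ∉ ys → (procOne x ys adj).getD k [] = adj.getD k []) := by
  induction ys generalizing adj with
  | nil => simp [procOne]
  | cons y ys' ih =>
      have hxy0 : x ≠ y := fun h => hx (by simp [h])
      have g1 : (pstep adj x y).getD x [] = adj.getD x [] ++ [y] := by
        rw [getD_pstep_fst adj x y x hxy0 rfl,
            PySem.Set.add_of_not_mem (hdisj y (by simp))]
      have g2 : (pstep adj x y).getD y [] = adj.getD y [] ++ [x] := by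
        rw [getD_pstep_snd adj x y y rfl (Ne.symm hxy0),
            PySem.Set.add_of_not_mem (hxy y (by simp))]
      have g3 : ∀ k, k ≠ x → k ≠ y → (pstep adj x y).getD k [] = adj.getD k [] :=
        fun k h1 h2 => getD_pstep_other adj x y k h2 h1
      have hx' : x ∉ ys' := fun h => hx (by simp [h])
      have hnd' : ys'.Nodup := hnd.of_cons
      have hyys' : y ∉ ys' := (List.nodup_cons.mp hnd).1
      have ihh := ih (pstep adj x y) hx' hnd'
        (fun z hz => by
          rw [g1]
          intro hmem
          rcases List.mem_append.mp hmem with h | h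
          · exact hdisj z (by simp [hz]) h
          · exact hyys' (by simpa using (List.mem_singleton.mp h) ▸ hz))
        (fun z hz => by
          have hzx : z ≠ x := fun h => hx' (h ▸ hz)
          have hzy : z ≠ y := fun h => hyys' (h ▸ hz)
          rw [g3 z hzx hzy]; exact hxy z (by simp [hz]))
      have hfold : procOne x (y :: ys') adj = procOne x ys' (pstep adj x y) := rfl
      refine ⟨?_, ?_, ?_⟩
      · rw [hfold, ihh.1, g1, List.append_assoc]; rfl
      · intro z hz
        rcases List.mem_cons.mp hz with h | h
        · subst h
          rw [hfold, ihh.2.2 z (Ne.symm hxy0) hyys', g2]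
        · rw [hfold, ihh.2.1 z h, g3 z (fun hh => hx' (hh ▸ h)) (fun hh => hyys' (hh ▸ h))]
      · intro k hkx hkl
        have hky : k ≠ y := fun h => hkl (by simp [h])
        have hkys' : k ∉ ys' := fun h => hkl (by simp [h])
        rw [hfold, ihh.2.2 k hkx hkys', g3 k hkx hky]

theorem procAll_spec (L : List Int) (adj : PySem.Dict Int (PySem.Set Int)) (P : List Int)
    (hso : L.Pairwise (· < ·))
    (hset : ∀ k ∈ L, adj.getD k [] = P)
    (hP : ∀ k ∈ L, k ∉ P)
    (hcont : ∀ k ∈ L, k ∈ adj.keys) :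
    (∀ k ∈ L, (procAll L adj).getD k [] = P ++ L.filter (fun y => decide (y ≠ k)))
    ∧ (∀ k, k ∉ L → (procAll L adj).getD k [] = adj.getD k [])
    ∧ (procAll L adj).keys = adj.keys := by
  induction L generalizing adj P with
  | nil => simp [procAll]
  | cons x r ih =>
      have hxr : x ∉ r := by
        intro hmem
        exact lt_irrefl x ((List.pairwise_cons.mp hso).1 x hmem)
      have hnd : r.Nodup := (List.pairwise_cons.mp hso).2.imp ne_of_lt
      have hone := procOne_getD x r adj hxr hnd
        (fun y hy => by rw [hset x (by simp)]; exact fun h => hP y (by simp [hy]) h)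
        (fun y hy => by rw [hset y (by simp [hy])]; exact hP x (by simp))
      have hkeys1 : (procOne x r adj).keys = adj.keys :=
        keys_procOne x r adj (hcont x (by simp)) (fun y hy => hcont y (by simp [hy]))
      have ihh := ih (procOne x r adj) (P ++ [x]) (List.pairwise_cons.mp hso).2
        (fun y hy => by rw [hone.2.1 y hy, hset y (by simp [hy])])
        (fun y hy => by
          intro hmem
          rcases List.mem_append.mp hmem with h | h
          · exact hP y (by simp [hy]) h
          · exact hxr ((List.mem_singleton.mp h) ▸ hy))
        (fun y hy => by rw [hkeys1]; exact hcont y (by simp [hy]))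
      have hfold : procAll (x :: r) adj = procAll r (procOne x r adj) := rfl
      refine ⟨?_, ?_, ?_⟩
      · intro k hk
        rcases List.mem_cons.mp hk with h | h
        · subst h
          rw [hfold, ihh.2.1 k hxr, hone.1, hset k (by simp)]
          have hflt : List.filter (fun y => decide (y ≠ k)) (k :: r) = r := by
            rw [List.filter_cons_of_neg (by simp)]
            exact List.filter_eq_self.mpr (fun y hy => by
              simp only [decide_eq_true_eq]
              exact fun hh => hxr (hh ▸ hy))
          rw [hflt]
        · have hkx : k ≠ x := fun hh => hxr (hh ▸ h)
          rw [hfold, ihh.1 k h]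
          simp [Ne.symm hkx, List.append_assoc]
      · intro k hk
        have hkx : k ≠ x := fun hh => hk (by simp [hh])
        have hkr : k ∉ r := fun hh => hk (by simp [hh])
        rw [hfold, ihh.2.1 k hkr, hone.2.2 k hkx hkr]
      · rw [hfold, ihh.2.2, hkeys1]

theorem fold_groups (Gs : List (List Int)) (adj : PySem.Dict Int (PySem.Set Int))
    (hdis : Gs.Pairwise (fun G G' => ∀ k ∈ G, k ∉ G'))
    (hs : ∀ G ∈ Gs, G.Pairwise (· < ·))
    (hc : ∀ G ∈ Gs, ∀ k ∈ G, k ∈ adj.keys ∧ adj.getD k [] = []) :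
    (∀ G ∈ Gs, ∀ k ∈ G,
      (Gs.foldl (fun a G => procAll G a) adj).getD k [] = G.filter (fun y => decide (y ≠ k)))
    ∧ (∀ k, (∀ G ∈ Gs, k ∉ G) → (Gs.foldl (fun a G => procAll G a) adj).getD k [] = adj.getD k [])
    ∧ (Gs.foldl (fun a G => procAll G a) adj).keys = adj.keys := by
  induction Gs generalizing adj with
  | nil => simp
  | cons G Gs' ih =>
      have hspec := procAll_spec G adj [] (hs G (by simp))
        (fun k hk => (hc G (by simp) k hk).2)
        (by simp)
        (fun k hk => (hc G (by simp) k hk).1)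
      have hdisG : ∀ G' ∈ Gs', ∀ k ∈ G, k ∉ G' := fun G' hG' k hk =>
        (List.pairwise_cons.mp hdis).1 G' hG' k hk
      have ihh := ih (procAll G adj) (List.pairwise_cons.mp hdis).2
        (fun G' hG' => hs G' (by simp [hG']))
        (fun G' hG' k hk => by
          have hkG : k ∉ G := fun hh => hdisG G' hG' k hh hk
          constructor
          · rw [hspec.2.2]; exact (hc G' (by simp [hG']) k hk).1
          · rw [hspec.2.1 k hkG]; exact (hc G' (by simp [hG']) k hk).2)
      have hfold : (G :: Gs').foldl (fun a G => procAll G a) adj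
          = Gs'.foldl (fun a G => procAll G a) (procAll G adj) := rfl
      refine ⟨?_, ?_, ?_⟩
      · intro G' hG' k hk
        rcases List.mem_cons.mp hG' with h | h
        · subst h
          have hknot : ∀ G'' ∈ Gs', k ∉ G'' := fun G'' hG'' => hdisG G'' hG'' k hk
          rw [hfold, ihh.2.1 k hknot, hspec.1 k hk]
          simp
        · rw [hfold, ihh.1 G' h k hk]
      · intro k hk
        rw [hfold, ihh.2.1 k (fun G' hG' => hk G' (by simp [hG'])),
            hspec.2.1 k (hk G (by simp))]
      · rw [hfold, ihh.2.2, hspec.2.2]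

theorem dloop (L : List Int) (adj : PySem.Dict Int (PySem.Set Int)) :
    (PySem.List.pyRange 0 (PySem.List.len L)).foldl
      (fun adj i =>
        (PySem.List.pyRange (i+1) (PySem.List.len L)).foldl
          (fun adj j => pstep adj (PySem.List.pyGetD L i 0) (PySem.List.pyGetD L j 0)) adj) adj
    = procAll L adj := by
  induction L generalizing adj with
  | nil =>
      rw [PySem.List.pyRange_one_eq_nil (by simp [PySem.List.len_eq])]
      rfl
  | cons x r ih =>
      have hlen : PySem.List.len (x :: r) = (r.length : Int) + 1 := by
        simp [PySem.List.len_eq]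
      rw [PySem.List.pyRange_one_cons (by rw [hlen]; omega)]
      rw [List.foldl_cons]
      have hx0 : PySem.List.pyGetD (x :: r) 0 0 = x := by
        have : ((0 : Nat) : Int) = (0 : Int) := rfl
        rw [← this, PySem.List.pyGetD_natCast]
        rfl
      have hfirst :
          (PySem.List.pyRange (0+1) (PySem.List.len (x :: r))).foldl
            (fun adj j => pstep adj (PySem.List.pyGetD (x :: r) 0 0) (PySem.List.pyGetD (x :: r) j 0)) adj
          = procOne x r adj := by
        rw [hx0]
        have := PySem.List.foldl_pyRange_pyGetD (x :: r) 0
          (fun a v => pstep a x v) adj (a := 0 + 1) (by omega)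
        rw [this]
        rfl
      rw [hfirst]
      -- the remaining outer iterations over indices 1..len-1 are the loop for r shifted by one
      have hshift :
          (PySem.List.pyRange (0+1) (PySem.List.len (x :: r))).foldl
            (fun adj i =>
              (PySem.List.pyRange (i+1) (PySem.List.len (x :: r))).foldl
                (fun adj j => pstep adj (PySem.List.pyGetD (x :: r) i 0) (PySem.List.pyGetD (x :: r) j 0)) adj)
            (procOne x r adj)
          = (PySem.List.pyRange 0 (PySem.List.len r)).foldl
            (fun adj i =>
              (PySem.List.pyRange (i+1) (PySem.List.len r)).foldl
                (fun adj j => pstep adj (PySem.List.pyGetD r i 0) (PySem.List.pyGetD r j 0)) adj)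
            (procOne x r adj) := by
        rw [PySem.List.pyRange_one (0+1) (PySem.List.len (x :: r)),
            PySem.List.pyRange_one 0 (PySem.List.len r)]
        have h1 : (PySem.List.len (x :: r) - (0+1)).toNat = r.length := by
          rw [hlen]; omega
        have h2 : (PySem.List.len r - 0).toNat = r.length := by
          simp [PySem.List.len_eq]
        rw [h1, h2, List.foldl_map, List.foldl_map]
        apply PySem.List.foldl_congr_mem
        intro acc k hk
        have hgd : PySem.List.pyGetD (x :: r) (0 + 1 + (k : Int)) 0
            = PySem.List.pyGetD r (0 + (k : Int)) 0 := by
          have e1 : (0 + 1 + (k : Int)) = ((k + 1 : Nat) : Int) := by push_cast; ring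
          have e2 : (0 + (k : Int)) = ((k : Nat) : Int) := by ring
          rw [e1, e2, PySem.List.pyGetD_natCast, PySem.List.pyGetD_natCast,
              List.getD_cons_succ]
        rw [hgd]
        have hi1 := PySem.List.foldl_pyRange_pyGetD (x :: r) 0
          (fun a v => pstep a (PySem.List.pyGetD r (0 + (k : Int)) 0) v) acc
          (a := 0 + 1 + (k : Int) + 1) (by omega)
        have hi2 := PySem.List.foldl_pyRange_pyGetD r 0
          (fun a v => pstep a (PySem.List.pyGetD r (0 + (k : Int)) 0) v) acc
          (a := 0 + (k : Int) + 1) (by omega)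
        rw [hi1, hi2]
        have e3 : (0 + 1 + (k : Int) + 1).toNat = k + 2 := by omega
        have e4 : (0 + (k : Int) + 1).toNat = k + 1 := by omega
        rw [e3, e4, List.drop_succ_cons]
      rw [hshift, ih]
      rfl

theorem states_step_eq (d : PySem.Dict String (List Int)) (st : String) (i : Int) :
    (let states := if d.contains st then d else d.insert st []
     states.insert st (states.getD st [] ++ [i])) = d.modify st [] (fun l => l ++ [i]) := by
  by_cases h : d.contains st = true
  · simp only [h, if_true]
    rfl
  · have h' : d.contains st = false := by simpa using h
    simp only [h', Bool.false_eq_true, if_false]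
    rw [PySem.Dict.getD_insert_self, PySem.Dict.insert_insert_self]
    show d.insert st ([] ++ [i]) = d.insert st (d.getD st [] ++ [i])
    rw [PySem.Dict.getD_of_not_contains _ _ h']

theorem diff_singleton (s : List Int) (i : Int) :
    PySem.Set.diff s [i] = s.filter (fun y => decide (y ≠ i)) := by
  unfold PySem.Set.diff
  apply List.filter_congr
  intro y _
  simp

-- the grouping dict, common to both ports after rewriting
def statesD (f : List (List (String × List (String × String)))) : PySem.Dict String (List Int) :=
  (PySem.List.enumerate f).foldl
    (fun d p => d.modify (fac_key p.2) [] (fun l => l ++ [p.1])) PySem.Dict.empty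

theorem map_key_enumerate (f : List (List (String × List (String × String)))) :
    (PySem.List.enumerate f).map (fun p => fac_key p.2) = ksOf f := by
  rw [show (fun (p : Int × List (String × List (String × String))) => fac_key p.2)
        = fac_key ∘ (fun p => p.2) from rfl,
      ← List.map_map, PySem.List.map_snd_enumerate]
  rfl

theorem statesD_keys (f : List (List (String × List (String × String)))) :
    (statesD f).keys = PySem.Set.ofList (ksOf f) := by
  unfold statesD
  rw [PySem.Dict.keys_foldl_modify_key (PySem.List.enumerate f)
        (fun p => fac_key p.2) [] (fun _ p l => l ++ [p.1]),
      PySem.Dict.keys_empty, PySem.Set.update_nil_left, map_key_enumerate]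

theorem statesD_keys_nodup (f : List (List (String × List (String × String)))) :
    (statesD f).keys.Nodup := by
  unfold statesD
  exact PySem.Dict.nodup_keys_foldl_modify_key (PySem.List.enumerate f)
    (fun p => fac_key p.2) [] (fun _ p l => l ++ [p.1]) PySem.Dict.empty
    (by rw [PySem.Dict.keys_empty]; exact List.nodup_nil)

theorem statesD_getD (f : List (List (String × List (String × String)))) (c : String) :
    (statesD f).getD c [] = grp f c := by
  unfold statesD
  rw [show ((PySem.List.enumerate f).foldl
        (fun d p => d.modify (fac_key p.2) [] (fun l => l ++ [p.1])) PySem.Dict.empty)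
      = (((PySem.List.enumerate f).map (fun p => (fac_key p.2, p.1))).foldl
        (fun d q => d.modify q.1 [] (fun l => l ++ [q.2])) PySem.Dict.empty)
      from (List.foldl_map (f := fun (p : Int × List (String × List (String × String))) => (fac_key p.2, p.1))
        (g := fun (d : PySem.Dict String (List Int)) (q : String × Int) => d.modify q.1 [] (fun l => l ++ [q.2]))
        (l := PySem.List.enumerate f) (init := PySem.Dict.empty)).symm]
  rw [PySem.Dict.getD_foldl_modify_append, PySem.Dict.getD_empty]
  unfold grp
  rw [List.filter_map, List.map_map]
  rfl

theorem grp_sorted (f : List (List (String × List (String × String)))) (c : String) :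
    (grp f c).Pairwise (· < ·) := by
  unfold grp
  exact ((PySem.List.pairwise_lt_enumerate f 0).filter _).map _ (fun a b h => h)

theorem mem_grp (f : List (List (String × List (String × String)))) (c : String) (k : Int) :
    k ∈ grp f c ↔ ∃ j : Nat, ∃ _ : j < f.length, k = (j : Int) ∧ fac_key f[j] = c := by
  unfold grp
  constructor
  · intro hk
    obtain ⟨p, hp, hpk⟩ := List.mem_map.mp hk
    obtain ⟨hpe, hpc⟩ := List.mem_filter.mp hp
    obtain ⟨j, hj, hpj⟩ := (PySem.List.mem_enumerate_iff f 0 p).mp hpe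
    refine ⟨j, hj, ?_, ?_⟩
    · rw [← hpk, hpj]; simp
    · have := of_decide_eq_true (by simpa using hpc)
      rw [hpj] at this
      simpa using this
  · rintro ⟨j, hj, rfl, hc⟩
    apply List.mem_map.mpr
    refine ⟨((j : Int), f[j]), List.mem_filter.mpr ⟨?_, ?_⟩, rfl⟩
    · exact (PySem.List.mem_enumerate_iff f 0 _).mpr ⟨j, hj, by simp⟩
    · simpa using hc

theorem grp_key_unique (f : List (List (String × List (String × String)))) (c c' : String)
    (k : Int) (h : k ∈ grp f c) (h' : k ∈ grp f c') : c = c' := by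
  obtain ⟨j, hj, hk, hc⟩ := (mem_grp f c k).mp h
  obtain ⟨j', hj', hk', hc'⟩ := (mem_grp f c' k).mp h'
  have hjj : (j : Int) = (j' : Int) := by rw [← hk, ← hk']
  have : j = j' := by exact_mod_cast hjj
  subst this
  rw [← hc, ← hc']

theorem grp_nodup (f : List (List (String × List (String × String)))) (c : String) :
    (grp f c).Nodup := (grp_sorted f c).imp ne_of_lt

def adj0 (f : List (List (String × List (String × String)))) : PySem.Dict Int (PySem.Set Int) :=
  (PySem.List.enumerate f).foldl (fun d p => d.insert p.1 PySem.Set.empty) PySem.Dict.empty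

theorem adj0_items (f : List (List (String × List (String × String)))) :
    (adj0 f).items = (PySem.List.enumerate f).map (fun p => (p.1, ([] : PySem.Set Int))) := by
  unfold adj0
  have h := PySem.Dict.items_foldl_insert_fresh (PySem.List.enumerate f)
    (fun p => p.1) (fun _ => (PySem.Set.empty : PySem.Set Int)) PySem.Dict.empty
    (fun a _ => PySem.Dict.contains_empty _)
    (by rw [PySem.List.map_fst_enumerate]; exact PySem.List.nodup_pyRange_one _ _)
  simpa using h

theorem adj0_keys (f : List (List (String × List (String × String)))) :
    (adj0 f).keys = PySem.List.pyRange 0 (PySem.List.len f) := by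
  simp only [PySem.Dict.keys]
  rw [adj0_items, List.map_map]
  rw [show ((fun (p : Int × PySem.Set Int) => p.1) ∘ (fun (p : Int × List (String × List (String × String))) => (p.1, ([] : PySem.Set Int)))) = (fun p => p.1) from rfl]
  rw [PySem.List.map_fst_enumerate]
  simp [PySem.List.len_eq]

theorem adj0_keys_nodup (f : List (List (String × List (String × String)))) :
    (adj0 f).keys.Nodup := by
  rw [adj0_keys]; exact PySem.List.nodup_pyRange_one _ _

theorem adj0_getD (f : List (List (String × List (String × String)))) (k : Int)
    (hk : k ∈ (adj0 f).keys) : (adj0 f).getD k [] = [] := by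
  have hk' : k ∈ (adj0 f).items.map (fun p => p.1) := hk
  obtain ⟨p, hp, hpk⟩ := List.mem_map.mp hk'
  have hpitems := hp
  rw [adj0_items] at hpitems
  obtain ⟨q, _, hq⟩ := List.mem_map.mp hpitems
  have : p = (k, ([] : PySem.Set Int)) := by rw [← hq] at hpk ⊢; simp [← hpk]
  rw [this] at hp
  exact PySem.Dict.getD_of_mem_items (adj0 f) hp (adj0_keys_nodup f) []

theorem A_eq_norm (f : List (List (String × List (String × String)))) :
    find_adjacent_counties f = normOut f := by
  simp only [find_adjacent_counties]
  have hstep : (fun (s : PySem.Dict String (List Int) × PySem.Dict Int (PySem.Set Int))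
      (p : Int × List (String × List (String × String))) =>
      (let state := fac_key p.2
       let states := if s.1.contains state then s.1 else s.1.insert state []
       (states.insert state (states.getD state [] ++ [p.1]),
        s.2.insert p.1 PySem.Set.empty)))
      = (fun s p =>
        (s.1.modify (fac_key p.2) [] (fun l => l ++ [p.1]),
         s.2.insert p.1 PySem.Set.empty)) := by
    funext s p
    exact congrArg (fun z => (z, s.2.insert p.1 PySem.Set.empty))
      (states_step_eq s.1 (fac_key p.2) p.1)
  rw [hstep, PySem.List.foldl_prod_mk
        (f := fun (d : PySem.Dict String (List Int)) (p : Int × List (String × List (String × String))) =>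
          d.modify (fac_key p.2) [] (fun l => l ++ [p.1]))
        (g := fun (d : PySem.Dict Int (PySem.Set Int)) (p : Int × List (String × List (String × String))) =>
          d.insert p.1 PySem.Set.empty)]
  rw [show ((PySem.List.enumerate f).foldl
        (fun (d : PySem.Dict String (List Int)) (p : Int × List (String × List (String × String))) =>
          d.modify (fac_key p.2) [] (fun l => l ++ [p.1])) PySem.Dict.empty)
      = statesD f from rfl]
  rw [show ((PySem.List.enumerate f).foldl
        (fun (d : PySem.Dict Int (PySem.Set Int)) (p : Int × List (String × List (String × String))) =>
          d.insert p.1 PySem.Set.empty) PySem.Dict.empty)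
      = adj0 f from rfl]
  have hloop : (fun (adj : PySem.Dict Int (PySem.Set Int)) (lst : List Int) =>
      (PySem.List.pyRange 0 (PySem.List.len lst)).foldl
        (fun adj i =>
          (PySem.List.pyRange (i+1) (PySem.List.len lst)).foldl
            (fun adj j =>
              let idx1 := PySem.List.pyGetD lst i 0
              let idx2 := PySem.List.pyGetD lst j 0
              let adj' := adj.modify idx1 PySem.Set.empty (fun t => PySem.Set.add t idx2)
              adj'.modify idx2 PySem.Set.empty (fun t => PySem.Set.add t idx1))
            adj)
        adj)
      = fun adj lst => procAll lst adj := by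
    funext adj lst
    exact dloop lst adj
  rw [hloop]
  -- the values of the state dict are the groups, one per distinct key
  rw [PySem.Dict.values_eq_map_keys (statesD f) (statesD_keys_nodup f) []]
  rw [show List.map (fun k => (statesD f).getD k []) (statesD f).keys
        = List.map (grp f) (statesD f).keys
      from List.map_congr_left (fun c _ => statesD_getD f c), statesD_keys]
  -- run the group folds
  have hfg := fold_groups ((PySem.Set.ofList (ksOf f)).map (grp f)) (adj0 f)
    (List.pairwise_map.mpr ((PySem.Set.nodup_ofList (ksOf f)).imp
      (fun {c c'} hne k hk hk' => hne (grp_key_unique f c c' k hk hk'))))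
    (fun G hG => by
      obtain ⟨c, _, rfl⟩ := List.mem_map.mp hG
      exact grp_sorted f c)
    (fun G hG k hk => by
      obtain ⟨c, _, rfl⟩ := List.mem_map.mp hG
      obtain ⟨j, hj, rfl, _⟩ := (mem_grp f c k).mp hk
      have hkmem : (j : Int) ∈ (adj0 f).keys := by
        rw [adj0_keys]
        exact PySem.List.mem_pyRange_one.mpr ⟨by positivity, by simp [PySem.List.len_eq]; omega⟩
      exact ⟨hkmem, adj0_getD f _ hkmem⟩)
  rw [PySem.Dict.items_eq_map_keys _ (by rw [hfg.2.2]; exact adj0_keys_nodup f) []]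
  rw [hfg.2.2, adj0_keys]
  unfold normOut
  apply List.map_congr_left
  intro i hi
  obtain ⟨hi0, hilt⟩ := PySem.List.mem_pyRange_one.mp hi
  have hilt' : i < (f.length : Int) := by rw [PySem.List.len_eq] at hilt; exact hilt
  have hij : i = ((i.toNat : Nat) : Int) := (Int.toNat_of_nonneg hi0).symm
  have hj : i.toNat < f.length := by omega
  have hks : PySem.List.pyGetD (ksOf f) i "" = fac_key f[i.toNat] := by
    conv_lhs => rw [hij]
    rw [PySem.List.pyGetD_natCast, List.getD_eq_getElem (ksOf f) ""
      (by simpa [ksOf] using hj)]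
    simp [ksOf]
  have hcmem : PySem.List.pyGetD (ksOf f) i "" ∈ PySem.Set.ofList (ksOf f) := by
    rw [PySem.Set.mem_ofList, hks]
    exact List.mem_map_of_mem (List.getElem_mem hj)
  have hGmem : grp f (PySem.List.pyGetD (ksOf f) i "") ∈ (PySem.Set.ofList (ksOf f)).map (grp f) :=
    List.mem_map_of_mem hcmem
  have hiG : i ∈ grp f (PySem.List.pyGetD (ksOf f) i "") :=
    (mem_grp f _ i).mpr ⟨i.toNat, hj, hij, hks.symm⟩
  exact congrArg (fun z => (i, z)) (hfg.1 _ hGmem i hiG)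

theorem B_eq_norm (f : List (List (String × List (String × String)))) :
    find_adjacent_counties_alt f = normOut f := by
  simp only [find_adjacent_counties_alt]
  rw [PySem.List.foldl_prod_mk
        (f := fun (d : PySem.Dict String (List Int)) (p : Int × List (String × List (String × String))) =>
          d.modify (fac_key p.2) [] (fun l => l ++ [p.1]))
        (g := fun (l : List String) (p : Int × List (String × List (String × String))) =>
          l ++ [fac_key p.2])]
  rw [show ((PySem.List.enumerate f).foldl
        (fun (l : List String) (p : Int × List (String × List (String × String))) => l ++ [fac_key p.2]) [])
      = ksOf f from by
    rw [PySem.List.foldl_append_singleton_eq_map (fun p => fac_key p.2) (PySem.List.enumerate f) [],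
        List.nil_append, map_key_enumerate]]
  rw [show ((PySem.List.enumerate f).foldl
        (fun (d : PySem.Dict String (List Int)) (p : Int × List (String × List (String × String))) =>
          d.modify (fac_key p.2) [] (fun l => l ++ [p.1])) PySem.Dict.empty)
      = statesD f from rfl]
  rw [PySem.List.enumerate_eq_map_pyRange (ksOf f) "", List.map_map]
  unfold normOut
  rw [show PySem.List.len (ksOf f) = PySem.List.len f from by simp [PySem.List.len_eq, ksOf]]
  apply List.map_congr_left
  intro i _
  show (i, PySem.Set.diff (PySem.Set.ofList ((statesD f).getD (PySem.List.pyGetD (ksOf f) i "") [])) [i]) = _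
  rw [statesD_getD, PySem.Set.ofList_eq_self_of_nodup _ (grp_nodup f _), diff_singleton]

-- ===== VERDICT (by name: the statement is the Claim_ definition above) =====
theorem find_adjacent_counties_spec : Claim_equal_find_adjacent_counties := by
  intro f _
  unfold Spec_find_adjacent_counties
  rw [A_eq_norm, B_eq_norm]
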